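-- pv_equiv track=rewrite | github.com/ramnath-1998/advent-of-code | Day5/main2.py | getRowAfterdeletingSpacesBetweenElements
-- ===== SOURCE A (Python) =====
-- def getRowAfterdeletingSpacesBetweenElements(row):
--     result = []
--     count_of_space = 0
--     for each_element in row:
--         if each_element != "":
--             for i in range(count_of_space//4):
--                 result.append(" ")
--             count_of_space = 0
--             result.append(each_element)
--         else :
--             count_of_space = count_of_space + 1
--     for i in range(count_of_space//4):
--         result.append(" ")
--     return result
-- ===== SOURCE B (Python) =====
-- def getRowAfterdeletingSpacesBetweenElements(row):
--     result = []
--     i = 0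
--     n = len(row)
--     while i < n:
--         if row[i] == "":
--             j = i
--             while j < n and row[j] == "":
--                 j += 1
--             result.extend([" "] * ((j - i) // 4))
--             i = j
--         else:
--             result.append(row[i])
--             i += 1
--     return result
-- ===== Notes on version B (the rewrite author's own statement) =====
-- stated objective: alternative
-- what changed: B scans each maximal run of empty strings with an inner pointer and emits (run length)//4 spaces per run at once, instead of A's per-element running space counter flushed on each non-empty element and at the end.
import Mathlib
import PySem

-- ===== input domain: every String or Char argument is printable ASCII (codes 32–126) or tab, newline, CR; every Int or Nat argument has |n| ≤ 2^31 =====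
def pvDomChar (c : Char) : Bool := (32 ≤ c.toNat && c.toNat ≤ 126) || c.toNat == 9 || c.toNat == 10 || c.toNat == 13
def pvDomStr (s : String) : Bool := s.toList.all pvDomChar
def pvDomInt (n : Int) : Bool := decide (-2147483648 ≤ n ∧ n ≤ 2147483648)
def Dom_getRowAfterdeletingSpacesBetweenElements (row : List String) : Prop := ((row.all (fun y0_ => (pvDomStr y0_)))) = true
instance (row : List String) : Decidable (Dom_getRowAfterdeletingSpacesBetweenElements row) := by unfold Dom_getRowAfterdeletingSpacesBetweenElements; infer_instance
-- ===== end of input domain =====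

-- B replaces A's running space counter (flushed per non-empty element) by a run-scanning pass that emits (run length)//4 spaces per maximal empty run; objective: alternative decomposition, same O(n) cost.


-- ===== PORT A =====
-- A: one pass with a running counter of consecutive empty strings, flushed
-- (count//4 spaces) before each non-empty element and once at the end.
-- The counter is a Python int that stays ≥ 0, so Nat with Nat division (= Python //4 on nonnegatives) is exact.
def getRowAfterdeletingSpacesBetweenElements (row : List String) : List String :=
  let s := row.foldl
    (fun (st : List String × Nat) each_element =>
      if each_element ≠ "" then
        (st.1 ++ List.replicate (st.2 / 4) " " ++ [each_element], 0)
      else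
        (st.1, st.2 + 1))
    ([], 0)
  s.1 ++ List.replicate (s.2 / 4) " "

-- ===== PORT B =====
-- B: run-scanning — consume each maximal run of empty strings at once
-- (emitting (run length)//4 spaces), copy non-empty elements through.
def getRowAfterdeletingSpacesBetweenElements_alt (row : List String) : List String :=
  match row with
  | [] => []
  | x :: xs =>
    if x = "" then
      List.replicate ((1 + (xs.takeWhile (fun y => y = "")).length) / 4) " "
        ++ getRowAfterdeletingSpacesBetweenElements_alt (xs.dropWhile (fun y => y = ""))
    else
      x :: getRowAfterdeletingSpacesBetweenElements_alt xs
termination_by row.length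
decreasing_by
  · exact Nat.lt_succ_of_le (List.length_dropWhile_le _ _)
  · simp

-- ===== PRECONDITION & SPEC =====

def Spec_getRowAfterdeletingSpacesBetweenElements (row : List String) (out : List String) : Prop := out = getRowAfterdeletingSpacesBetweenElements_alt row
instance (row : List String) (out : List String) : Decidable (Spec_getRowAfterdeletingSpacesBetweenElements row out) := by unfold Spec_getRowAfterdeletingSpacesBetweenElements; infer_instance

-- ===== CLAIM (what is proved, stated in full; the proofs are below) =====
def Claim_equal_getRowAfterdeletingSpacesBetweenElements : Prop := ∀ (row : List String), Dom_getRowAfterdeletingSpacesBetweenElements row → Spec_getRowAfterdeletingSpacesBetweenElements row (getRowAfterdeletingSpacesBetweenElements row)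

-- ===== LEMMAS AND PROOFS =====

-- counter-carrying variant of B, the bridge between A's fold and B's run recursion
def pvAltC : Nat → List String → List String
  | c, [] => List.replicate (c / 4) " "
  | c, x :: xs =>
    if x = "" then pvAltC (c + 1) xs
    else List.replicate (c / 4) " " ++ x :: pvAltC 0 xs

-- B consumes a leading empty run in one step
lemma pvAlt_run (l : List String) :
    getRowAfterdeletingSpacesBetweenElements_alt l =
      List.replicate ((l.takeWhile (fun y => y = "")).length / 4) " "
        ++ getRowAfterdeletingSpacesBetweenElements_alt (l.dropWhile (fun y => y = "")) := by
  cases l with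
  | nil => simp [getRowAfterdeletingSpacesBetweenElements_alt]
  | cons x xs =>
    by_cases hx : x = ""
    · subst hx
      rw [getRowAfterdeletingSpacesBetweenElements_alt]
      simp [Nat.add_comm]
    · simp [hx]

lemma pvAltC_eq (xs : List String) : ∀ c : Nat,
    pvAltC c xs =
      List.replicate ((c + (xs.takeWhile (fun y => y = "")).length) / 4) " "
        ++ getRowAfterdeletingSpacesBetweenElements_alt (xs.dropWhile (fun y => y = "")) := by
  induction xs with
  | nil => intro c; simp [pvAltC, getRowAfterdeletingSpacesBetweenElements_alt]
  | cons x xs ih =>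
    intro c
    by_cases hx : x = ""
    · subst hx
      rw [pvAltC, if_pos rfl, ih (c + 1)]
      simp only [List.takeWhile_cons, List.dropWhile_cons, decide_eq_true_eq, if_true,
        List.length_cons]
      congr 2
      omega
    · have ht : List.takeWhile (fun y => decide (y = "")) (x :: xs) = [] := by simp [hx]
      have hd : List.dropWhile (fun y => decide (y = "")) (x :: xs) = x :: xs := by simp [hx]
      rw [pvAltC, if_neg hx, ih 0, ht, hd]
      simp only [List.length_nil, Nat.add_zero, Nat.zero_add]
      rw [← pvAlt_run xs]
      rw [getRowAfterdeletingSpacesBetweenElements_alt]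
      simp [hx]

lemma pv_fold_eq (xs : List String) : ∀ (acc : List String) (c : Nat),
    (xs.foldl
        (fun (st : List String × Nat) e =>
          if e ≠ "" then (st.1 ++ List.replicate (st.2 / 4) " " ++ [e], 0)
          else (st.1, st.2 + 1)) (acc, c)).1
      ++ List.replicate ((xs.foldl
        (fun (st : List String × Nat) e =>
          if e ≠ "" then (st.1 ++ List.replicate (st.2 / 4) " " ++ [e], 0)
          else (st.1, st.2 + 1)) (acc, c)).2 / 4) " "
      = acc ++ pvAltC c xs := by
  induction xs with
  | nil => intro acc c; simp [pvAltC]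
  | cons x xs ih =>
    intro acc c
    by_cases hx : x = ""
    · subst hx
      simpa [pvAltC] using ih acc (c + 1)
    · simp only [List.foldl_cons, ne_eq, hx, not_false_iff, if_true, pvAltC]
      rw [ih (acc ++ List.replicate (c / 4) " " ++ [x]) 0]
      simp

-- ===== VERDICT (by name: the statement is the Claim_ definition above) =====
theorem getRowAfterdeletingSpacesBetweenElements_spec : Claim_equal_getRowAfterdeletingSpacesBetweenElements := by
  intro row _
  unfold Spec_getRowAfterdeletingSpacesBetweenElements getRowAfterdeletingSpacesBetweenElements
  rw [pv_fold_eq row [] 0, pvAltC_eq row 0]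
  simp only [List.nil_append, Nat.zero_add]
  rw [← pvAlt_run row]
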